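-- pv_equiv track=rewrite | github.com/trakt/Plex-Trakt-Scrobbler | Trakttv.bundle/Contents/Libraries/Shared/pyasn1/type/univ.py | fromHexString
-- ===== SOURCE A (Python) =====
-- def fromHexString(value):
--     r = []
--     for v in value:
--         v = int(v, 16)
--         i = 4
--         while i:
--             i -= 1
--             r.append((v >> i) & 0x01)
--     return tuple(r)
-- ===== SOURCE B (Python) =====
-- def fromHexString(value):
--     if not value:
--         return ()
--     n = int(value, 16)
--     total = 4 * len(value)
--     return tuple((n >> (total - 1 - i)) & 1 for i in range(total))
-- ===== Notes on version B (the rewrite author's own statement) =====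
-- stated objective: simpler
-- what changed: Replaces the per-character loop with its inner 4-step shift loop by one int(value,16) conversion of the whole string plus a single flat MSB-first bit extraction over range(4*len(value)).
import Mathlib
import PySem

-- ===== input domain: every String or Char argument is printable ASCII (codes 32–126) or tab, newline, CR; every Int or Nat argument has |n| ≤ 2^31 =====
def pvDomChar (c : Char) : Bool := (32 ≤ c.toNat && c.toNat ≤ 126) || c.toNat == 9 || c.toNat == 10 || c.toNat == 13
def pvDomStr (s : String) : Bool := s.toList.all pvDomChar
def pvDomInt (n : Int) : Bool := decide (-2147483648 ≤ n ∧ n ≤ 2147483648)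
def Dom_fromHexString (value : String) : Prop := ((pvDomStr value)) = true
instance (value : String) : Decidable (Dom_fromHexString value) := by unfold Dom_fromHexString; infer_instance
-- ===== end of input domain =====

-- B replaces A's per-character loop (with an inner 4-step shift loop) by one whole-string
-- hex-to-int conversion followed by a single flat MSB-first bit extraction; objective: simpler.


-- ===== PORT A =====
-- int(c, 16) for a SINGLE character c: exact for one-character strings (whitespace/sign/underscore
-- alone are not valid int literals, so a lone char parses iff it is a hex digit).
def hexVal? (c : Char) : Option Int :=
  let n := c.toNat
  if 48 ≤ n ∧ n ≤ 57 then some ((n : Int) - 48)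
  else if 97 ≤ n ∧ n ≤ 102 then some ((n : Int) - 87)
  else if 65 ≤ n ∧ n ≤ 70 then some ((n : Int) - 55)
  else none

-- the 'while i:' loop: i counts 4,3,2,1; each step appends (v >> (i-1)) & 1
def nibLoop (v : Int) (i : Nat) (r : List Int) : List Int :=
  match i with
  | 0 => r
  | j + 1 => nibLoop v j (r ++ [PySem.Int.band (v >>> j) 1])

def fromHexString (value : String) : List Int :=
  value.toList.foldl (fun r c => nibLoop ((hexVal? c).getD 0) 4 r) []

-- ===== PORT B =====
-- int(value, 16) on Pre_ (a non-empty string of hex digits): plain base-16 positional fold,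
-- exact there (no sign/whitespace/prefix/underscore can occur inside Pre_).
def hexNum (cs : List Char) : Int :=
  cs.foldl (fun a c => a * 16 + (hexVal? c).getD 0) 0

def fromHexString_alt (value : String) : List Int :=
  if value.toList = [] then []
  else
    let n := hexNum value.toList
    let total := 4 * value.toList.length
    (List.range total).map (fun i => PySem.Int.band (n >>> (total - 1 - i)) 1)

-- ===== PRECONDITION & SPEC =====
-- Pre_: every character is a hex digit — exactly the inputs where A's int(v, 16) never raises.
def Pre_fromHexString (value : String) : Prop :=
  (value.toList.all fun c => (hexVal? c).isSome) = true
instance (value : String) : Decidable (Pre_fromHexString value) := by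
  unfold Pre_fromHexString; infer_instance

def pvWitness_fromHexString : String := "Ab03"

def Spec_fromHexString (value : String) (out : List Int) : Prop := out = fromHexString_alt value
instance (value : String) (out : List Int) : Decidable (Spec_fromHexString value out) := by unfold Spec_fromHexString; infer_instance

-- ===== CLAIM (what is proved, stated in full; the proofs are below) =====
def Claim_equal_fromHexString : Prop := ∀ (value : String), Dom_fromHexString value → Pre_fromHexString value → Spec_fromHexString value (fromHexString value)

-- ===== LEMMAS AND PROOFS =====

-- the bit list B extracts from n over width t
def bitsOf (n : Int) (t : Nat) : List Int :=
  (List.range t).map (fun i => PySem.Int.band (n >>> (t - 1 - i)) 1)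

theorem bitsOf_zero (n : Int) : bitsOf n 0 = [] := rfl

theorem nibLoop_four (v : Int) (r : List Int) : nibLoop v 4 r = r ++ bitsOf v 4 := by
  simp [nibLoop, bitsOf, List.range_succ]

theorem hexVal?_bounds {c : Char} {v : Int} (h : hexVal? c = some v) : 0 ≤ v ∧ v < 16 := by
  simp only [hexVal?] at h
  split_ifs at h <;> simp_all <;> omega

-- splitting the bit list of a*2^t + m at the 2^t boundary
theorem bitsOf_split (a m : Int) (s t : Nat) (hm0 : 0 ≤ m) (hm : m < 2 ^ t) :
    bitsOf (a * 2 ^ t + m) (s + t) = bitsOf a s ++ bitsOf m t := by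
  unfold bitsOf
  rw [List.range_add, List.map_append, List.map_map]
  congr 1
  · apply List.map_congr_left
    intro i hi
    rw [List.mem_range] at hi
    have he : s + t - 1 - i = (s - 1 - i) + t := by omega
    rw [he]
    congr 1
    rw [Int.shiftRight_eq_div_pow, Int.shiftRight_eq_div_pow]
    push_cast
    rw [pow_add, mul_comm ((2:Int) ^ (s - 1 - i)),
      ← Int.ediv_ediv_of_nonneg (by positivity)]
    congr 1
    rw [add_comm, Int.add_mul_ediv_right _ _ (by positivity : (2:Int) ^ t ≠ 0),
      Int.ediv_eq_zero_of_lt hm0 hm, zero_add]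
  · apply List.map_congr_left
    intro i hi
    rw [List.mem_range] at hi
    simp only [Function.comp]
    have he : s + t - 1 - (s + i) = t - 1 - i := by omega
    rw [he, PySem.Int.band_one, PySem.Int.band_one,
      PySem.Int.mod_eq_emod_of_pos (by norm_num), PySem.Int.mod_eq_emod_of_pos (by norm_num),
      Int.shiftRight_eq_div_pow, Int.shiftRight_eq_div_pow]
    push_cast
    have he3 : t - (t - 1 - i) - 1 + (t - 1 - i) + 1 = t := by omega
    have hd : a * 2 ^ t + m = m + a * 2 ^ (t - (t - 1 - i) - 1) * 2 * 2 ^ (t - 1 - i) := by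
      rw [show a * 2 ^ (t - (t - 1 - i) - 1) * 2 * 2 ^ (t - 1 - i)
            = a * ((2:Int) ^ (t - (t - 1 - i) - 1) * 2 ^ (t - 1 - i) * 2) by ring,
        ← pow_add, ← pow_succ, he3]
      ring
    rw [hd, show m + a * 2 ^ (t - (t - 1 - i) - 1) * 2 * 2 ^ (t - 1 - i)
          = m + (a * 2 ^ (t - (t - 1 - i) - 1) * 2) * 2 ^ (t - 1 - i) by ring,
      Int.add_mul_ediv_right _ _ (by positivity : (2:Int) ^ (t - 1 - i) ≠ 0)]
    generalize a * 2 ^ (t - (t - 1 - i) - 1) = A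
    omega

-- foldl of the base-16 accumulator started at a
theorem hexFold_shift (cs : List Char) (a : Int) :
    cs.foldl (fun a c => a * 16 + (hexVal? c).getD 0) a
      = a * 16 ^ cs.length + hexNum cs := by
  induction cs generalizing a with
  | nil => simp [hexNum]
  | cons c cs ih =>
    simp only [List.foldl_cons, List.length_cons]
    rw [ih]
    have h2 : hexNum (c :: cs) = (0 * 16 + (hexVal? c).getD 0) * 16 ^ cs.length + hexNum cs := by
      have h0 : hexNum (c :: cs)
          = cs.foldl (fun a c => a * 16 + (hexVal? c).getD 0) (0 * 16 + (hexVal? c).getD 0) := rfl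
      rw [h0, ih]
    rw [h2]; ring

theorem hexNum_cons {c : Char} {v : Int} (cs : List Char) (hv : hexVal? c = some v) :
    hexNum (c :: cs) = v * 16 ^ cs.length + hexNum cs := by
  have h0 : hexNum (c :: cs)
      = cs.foldl (fun a c => a * 16 + (hexVal? c).getD 0) (0 * 16 + (hexVal? c).getD 0) := rfl
  rw [h0, hexFold_shift, hv]
  simp

theorem hexNum_bounds (cs : List Char) (h : ∀ c ∈ cs, (hexVal? c).isSome = true) :
    0 ≤ hexNum cs ∧ hexNum cs < 16 ^ cs.length := by
  induction cs with
  | nil => simp [hexNum]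
  | cons c cs ih =>
    obtain ⟨v, hv⟩ := Option.isSome_iff_exists.mp (h c (by simp))
    have hb := hexVal?_bounds hv
    have ih' := ih (fun c hc => h c (by simp [hc]))
    rw [hexNum_cons cs hv]
    have h16 : (0:Int) ≤ 16 ^ cs.length := by positivity
    simp only [List.length_cons, pow_succ]
    constructor
    · nlinarith
    · nlinarith

-- A's fold produces exactly B's bit list of hexNum
theorem foldA_eq (cs : List Char) (h : ∀ c ∈ cs, (hexVal? c).isSome = true) (r : List Int) :
    cs.foldl (fun r c => nibLoop ((hexVal? c).getD 0) 4 r) r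
      = r ++ bitsOf (hexNum cs) (4 * cs.length) := by
  induction cs generalizing r with
  | nil => simp [bitsOf_zero, hexNum]
  | cons c cs ih =>
    obtain ⟨v, hv⟩ := Option.isSome_iff_exists.mp (h c (by simp))
    have hb := hexVal?_bounds hv
    have hrest : ∀ c ∈ cs, (hexVal? c).isSome = true := fun c hc => h c (by simp [hc])
    have hnb := hexNum_bounds cs hrest
    simp only [List.foldl_cons]
    rw [hv]
    simp only [Option.getD_some]
    rw [ih hrest, nibLoop_four, List.append_assoc]
    congr 1
    have hpow : (16:Int) ^ cs.length = 2 ^ (4 * cs.length) := by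
      rw [pow_mul]; norm_num
    have hnum : hexNum (c :: cs) = v * 2 ^ (4 * cs.length) + hexNum cs := by
      rw [hexNum_cons cs hv, hpow]
    have hlen : 4 * (c :: cs).length = 4 + 4 * cs.length := by
      simp [List.length_cons]; ring
    rw [hnum, hlen,
      bitsOf_split v (hexNum cs) 4 (4 * cs.length) hnb.1 (hpow ▸ hnb.2)]

-- ===== VERDICT (by name: the statement is the Claim_ definition above) =====
theorem fromHexString_spec : Claim_equal_fromHexString := by
  intro value _ hpre
  unfold Pre_fromHexString at hpre
  rw [List.all_eq_true] at hpre
  unfold Spec_fromHexString fromHexString fromHexString_alt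
  rw [foldA_eq value.toList hpre []]
  by_cases hnil : value.toList = []
  · simp [hnil, bitsOf_zero, hexNum]
  · simp only [if_neg hnil, List.nil_append]
    rfl
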